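-- pv_equiv track=rewrite | github.com/tkhwang/tkhwang-datastructure-algorithm | hacker-rank/algorithm/string/weighted-uniform-string.py | combinationG
-- ===== SOURCE A (Python) =====
-- def combinationG(input):
--     level=['']
--     for v in input:
--         nList=[]
--         for item in level:
--             new = item + v
--             yield new
--             nList.append(new)
--         level+=nList
-- ===== SOURCE B (Python) =====
-- def combinationG(input):
--     chars = list(input)
--     for k in range(1, 2 ** len(chars)):
--         s = ''
--         m = k
--         for c in chars:
--             if m % 2 == 1:
--                 s += c
--             m //= 2
--         yield s
-- ===== Notes on version B (the rewrite author's own statement) =====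
-- stated objective: alternative
-- what changed: B replaces A's growing accumulator list of all previously yielded subsequences by direct bitmask counting: it yields, for k = 1 .. 2**n-1, the subsequence of characters at the set bits of k, so no O(2^n) level list is kept.
import Mathlib
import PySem

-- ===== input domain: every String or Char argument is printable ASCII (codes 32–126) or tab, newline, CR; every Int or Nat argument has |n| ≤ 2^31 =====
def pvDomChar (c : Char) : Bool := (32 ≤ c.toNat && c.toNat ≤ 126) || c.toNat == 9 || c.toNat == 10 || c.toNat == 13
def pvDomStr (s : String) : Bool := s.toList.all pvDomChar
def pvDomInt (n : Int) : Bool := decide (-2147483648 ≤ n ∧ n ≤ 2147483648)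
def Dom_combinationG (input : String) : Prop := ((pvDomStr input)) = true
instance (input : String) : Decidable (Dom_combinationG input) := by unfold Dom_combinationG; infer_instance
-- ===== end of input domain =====

-- B enumerates the yields by bitmask counting instead of A's growing accumulator list; equal output list.

-- ===== PORT A =====
-- strings handled as List Char internally, converted to String at the very end
def combinationG_go : List Char → List (List Char) → List (List Char) → List (List Char)
  | [], _, out => out
  | v :: vs, level, out =>
      let nList := level.map (fun item => item ++ [v])
      combinationG_go vs (level ++ nList) (out ++ nList)

def combinationG (input : String) : List String :=
  (combinationG_go input.toList [[]] []).map String.ofList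

-- ===== PORT B =====
-- inner loop of Source B: s = ''; m = k; for c in chars: if m % 2 == 1: s += c; m //= 2
def combinationG_sub (chars : List Char) (k : Int) : List Char :=
  (chars.foldl
      (fun st c =>
        (if PySem.Int.mod st.2 2 == 1 then st.1 ++ [c] else st.1, PySem.Int.floordiv st.2 2))
      (([] : List Char), k)).1

def combinationG_alt (input : String) : List String :=
  (PySem.List.pyRange 1 (2 ^ input.toList.length) 1).map
    (fun k => String.ofList (combinationG_sub input.toList k))

-- ===== PRECONDITION & SPEC =====
def Spec_combinationG (input : String) (out : List String) : Prop := out = combinationG_alt input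
instance (input : String) (out : List String) : Decidable (Spec_combinationG input out) := by unfold Spec_combinationG; infer_instance

-- ===== CLAIM (what is proved, stated in full; the proofs are below) =====
def Claim_equal_combinationG : Prop := ∀ (input : String), Dom_combinationG input → Spec_combinationG input (combinationG input)

-- ===== LEMMAS AND PROOFS =====

-- g cs k : the subsequence of cs whose indices are the set bits of k (bit 0 = head)
def pvG : List Char → Nat → List Char
  | [], _ => []
  | c :: cs, k => (if k % 2 = 1 then [c] else []) ++ pvG cs (k / 2)

theorem pvG_zero (cs : List Char) : pvG cs 0 = [] := by
  induction cs with
  | nil => rfl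
  | cons c cs ih => simp [pvG, ih]

theorem pvG_append (p q : List Char) (k : Nat) :
    pvG (p ++ q) k = pvG p k ++ pvG q (k / 2 ^ p.length) := by
  induction p generalizing k with
  | nil => simp [pvG]
  | cons c cs ih =>
      simp only [List.cons_append, pvG, ih, List.append_assoc, List.length_cons]
      rw [Nat.div_div_eq_div_mul, pow_succ, mul_comm]

theorem pvG_add_pow (p : List Char) (k : Nat) :
    pvG p (2 ^ p.length + k) = pvG p k := by
  induction p generalizing k with
  | nil => rfl
  | cons c cs ih =>
      have h2 : 2 ^ (c :: cs).length = 2 * 2 ^ cs.length := by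
        simp [List.length_cons, pow_succ, mul_comm]
      simp only [pvG]
      have hm : (2 ^ (c :: cs).length + k) % 2 = k % 2 := by
        omega
      have hd : (2 ^ (c :: cs).length + k) / 2 = 2 ^ cs.length + k / 2 := by
        omega
      rw [hm, hd, ih]

-- the level list after processing prefix p, and one doubling step of it
def pvL (p : List Char) : List (List Char) := (List.range (2 ^ p.length)).map (pvG p)

theorem pvL_step (p : List Char) (v : Char) :
    pvL (p ++ [v]) = pvL p ++ (pvL p).map (fun item => item ++ [v]) := by
  have hlen : (p ++ [v]).length = p.length + 1 := by simp
  have hpow : 2 ^ (p.length + 1) = 2 ^ p.length + 2 ^ p.length := by ring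
  simp only [pvL, hlen, hpow, List.range_add, List.map_append, List.map_map]
  congr 1
  · apply List.map_congr_left
    intro k hk
    have hk' : k < 2 ^ p.length := List.mem_range.mp hk
    rw [pvG_append]
    rw [Nat.div_eq_of_lt hk', pvG_zero, List.append_nil]
  · apply List.map_congr_left
    intro k hk
    have hk' : k < 2 ^ p.length := List.mem_range.mp hk
    simp only [Function.comp_apply]
    rw [pvG_append]
    have hdiv : (2 ^ p.length + k) / 2 ^ p.length = 1 := by
      rw [Nat.add_div_left _ (by positivity), Nat.div_eq_of_lt hk']
    rw [hdiv, pvG_add_pow]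
    simp [pvG]

theorem pvGo_spec (vs : List Char) : ∀ (p : List Char) (out : List (List Char)),
    combinationG_go vs (pvL p) out =
      out ++ (List.range' (2 ^ p.length) (2 ^ (p.length + vs.length) - 2 ^ p.length)).map
        (pvG (p ++ vs)) := by
  induction vs with
  | nil =>
      intro p out
      simp [combinationG_go]
  | cons v ws ih =>
      intro p out
      have h1 : 2 ^ p.length ≤ 2 ^ (p.length + 1) := Nat.pow_le_pow_right (by norm_num) (by omega)
      have h2 : 2 ^ (p.length + 1) ≤ 2 ^ (p.length + (ws.length + 1)) :=
        Nat.pow_le_pow_right (by norm_num) (by omega)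
      simp only [combinationG_go]
      rw [← pvL_step p v, ih (p ++ [v]) (out ++ (pvL p).map (fun item => item ++ [v]))]
      have hnList : (pvL p).map (fun item => item ++ [v]) =
          (List.range' (2 ^ p.length) (2 ^ p.length)).map (pvG (p ++ v :: ws)) := by
        simp only [pvL, List.range'_eq_map_range, List.map_map]
        apply List.map_congr_left
        intro k hk
        have hk' : k < 2 ^ p.length := List.mem_range.mp hk
        simp only [Function.comp_apply]
        have : p ++ v :: ws = (p ++ [v]) ++ ws := by simp
        rw [this, pvG_append, pvG_append]
        have hdiv : (2 ^ p.length + k) / 2 ^ p.length = 1 := by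
          rw [Nat.add_div_left _ (by positivity), Nat.div_eq_of_lt hk']
        have hdiv2 : (2 ^ p.length + k) / 2 ^ (p ++ [v]).length = 0 := by
          apply Nat.div_eq_of_lt
          have : (p ++ [v]).length = p.length + 1 := by simp
          rw [this]
          omega
        rw [hdiv, hdiv2, pvG_add_pow, pvG_zero]
        simp [pvG]
      have e1 : p ++ [v] ++ ws = p ++ v :: ws := by simp
      have hplen : (p ++ [v]).length = p.length + 1 := by simp
      rw [hnList, e1, hplen, List.append_assoc, ← List.map_append]
      congr 1
      have hs : (2 : Nat) ^ (p.length + 1) = 2 ^ p.length + 1 * 2 ^ p.length := by ring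
      rw [hs, List.range'_append]
      have : p.length + (v :: ws).length = p.length + 1 + ws.length := by simp; omega
      rw [this]
      have h3 : (2 : Nat) ^ (p.length + 1) = 2 ^ p.length + 2 ^ p.length := by ring
      have h4 : (2 : Nat) ^ (p.length + 1) ≤ 2 ^ (p.length + 1 + ws.length) :=
        Nat.pow_le_pow_right (by norm_num) (by omega)
      have hcount : 2 ^ p.length + (2 ^ (p.length + 1 + ws.length) - (2 ^ p.length + 1 * 2 ^ p.length))
          = 2 ^ (p.length + 1 + ws.length) - 2 ^ p.length := by omega
      rw [hcount]

theorem combinationG_eq_range' (input : String) :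
    combinationG input =
      (List.range' 1 (2 ^ input.toList.length - 1)).map (fun k => String.ofList (pvG input.toList k)) := by
  unfold combinationG
  have hL : ([[]] : List (List Char)) = pvL [] := by simp [pvL, pvG]
  rw [hL, pvGo_spec input.toList [] []]
  simp [List.map_map, Function.comp]

theorem pvSub_eq_pvG (cs : List Char) : ∀ (k : Nat) (acc : List Char),
    (cs.foldl
        (fun st c =>
          (if PySem.Int.mod st.2 2 == 1 then st.1 ++ [c] else st.1, PySem.Int.floordiv st.2 2))
        (acc, (k : Int))).1 = acc ++ pvG cs k := by
  induction cs with
  | nil => intro k acc; simp [pvG]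
  | cons c cs ih =>
      intro k acc
      have hm : PySem.Int.mod (k : Int) 2 = ((k % 2 : Nat) : Int) := by
        exact_mod_cast PySem.Int.mod_natCast k 2
      have hd : PySem.Int.floordiv (k : Int) 2 = ((k / 2 : Nat) : Int) := by
        exact_mod_cast PySem.Int.floordiv_natCast k 2
      simp only [List.foldl_cons, hm, hd]
      rw [ih (k / 2)]
      by_cases h : k % 2 = 1
      · simp [pvG, h]
      · have h0 : k % 2 = 0 := by omega
        simp [pvG, h0]

theorem combinationG_alt_eq_range' (input : String) :
    combinationG_alt input =
      (List.range' 1 (2 ^ input.toList.length - 1)).map (fun k => String.ofList (pvG input.toList k)) := by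
  unfold combinationG_alt
  have hpow : ((2 : Int) ^ input.toList.length) = ((2 ^ input.toList.length : Nat) : Int) := by
    push_cast; ring
  rw [hpow, PySem.List.pyRange_one]
  have htn : (((2 ^ input.toList.length : Nat) : Int) - 1).toNat = 2 ^ input.toList.length - 1 := by
    omega
  rw [htn, List.range'_eq_map_range, List.map_map, List.map_map]
  apply List.map_congr_left
  intro k _
  simp only [Function.comp_apply]
  have hc : (1 : Int) + (k : Int) = ((1 + k : Nat) : Int) := by push_cast; ring
  rw [hc]
  unfold combinationG_sub
  rw [pvSub_eq_pvG input.toList (1 + k) []]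
  simp

-- ===== VERDICT (by name: the statement is the Claim_ definition above) =====
theorem combinationG_spec : Claim_equal_combinationG := by
  intro input _
  unfold Spec_combinationG
  rw [combinationG_eq_range', combinationG_alt_eq_range']
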